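-- pv_equiv track=rewrite | github.com/GolemOnce/Algorithm | programmers/LV2/389479.py | solution
-- ===== SOURCE A (Python) =====
-- def solution(players, m, k):
--     answer = 0
--     limit = [m] * 24
--
--     for i, player in enumerate(players):
--         if player >= limit[i]:
--             install = (player - limit[i]) // m + 1
--             answer += install
--             for j in range(i, i + k):
--                 if j < 24:
--                     limit[j] += install * m
--
--     return answer
-- ===== SOURCE B (Python) =====
-- def solution(players, m, k):
--     answer = 0
--     events = []  # (expiry_hour, extra_capacity): capacity active for hours h with h < expiry_hour
--     for i, player in enumerate(players):
--         cap = m + sum(amt for e, amt in events if i < e)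
--         if player >= cap:
--             need = (player - cap) // m + 1
--             answer += need
--             events.append((i + k, need * m))
--     return answer
-- ===== Notes on version B (the rewrite author's own statement) =====
-- stated objective: alternative
-- what changed: Replaces the 24-slot limit array with its inner range-update loop by a single pass that keeps a log of (expiry hour, added capacity) events and derives each hour's capacity by summing the not-yet-expired events.
import Mathlib
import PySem

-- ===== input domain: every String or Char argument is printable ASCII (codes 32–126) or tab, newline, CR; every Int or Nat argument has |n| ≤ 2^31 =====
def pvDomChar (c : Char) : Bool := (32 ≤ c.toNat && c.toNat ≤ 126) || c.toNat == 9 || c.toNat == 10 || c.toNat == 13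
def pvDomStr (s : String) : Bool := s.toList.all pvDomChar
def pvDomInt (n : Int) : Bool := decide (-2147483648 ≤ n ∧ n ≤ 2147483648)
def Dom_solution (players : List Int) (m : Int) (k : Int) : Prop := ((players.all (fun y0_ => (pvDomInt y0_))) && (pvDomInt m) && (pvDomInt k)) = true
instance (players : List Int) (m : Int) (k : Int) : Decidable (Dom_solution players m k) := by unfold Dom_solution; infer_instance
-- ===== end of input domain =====

-- B replaces the 24-slot limit array and its inner range-update loop by a single pass that
-- derives each hour's capacity from a log of (expiry hour, added capacity) events (objective: alternative).

-- ===== PORT A =====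
-- limit[j] += install * m, guarded by j < 24 (the inner loop body of A)
def bumpStep (v : Int) (lim : List Int) (j : Int) : List Int :=
  if j < 24 then PySem.List.pySetD lim j (PySem.List.pyGetD lim j 0 + v) else lim

-- the for-loop of A: state (i, answer, limit); index i carried explicitly (enumerate)
def solutionGoA (m k : Int) : List Int → Int → Int → List Int → Int
  | [], _, ans, _ => ans
  | player :: ps, i, ans, limit =>
    let li := PySem.List.pyGetD limit i 0
    if li ≤ player then
      let install := PySem.Int.floordiv (player - li) m + 1
      let limit' := (PySem.List.pyRange i (i + k) 1).foldl (bumpStep (install * m)) limit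
      solutionGoA m k ps (i + 1) (ans + install) limit'
    else
      solutionGoA m k ps (i + 1) ans limit

def solution (players : List Int) (m : Int) (k : Int) : Int :=
  solutionGoA m k players 0 0 (List.replicate 24 m)

-- ===== PORT B =====
-- sum(amt for e, amt in events if i < e)
def capSum (events : List (Int × Int)) (i : Int) : Int :=
  ((events.filter (fun p => decide (i < p.1))).map Prod.snd).sum

-- the single loop of B: state (i, answer, events)
def solutionGoB (m k : Int) : List Int → Int → Int → List (Int × Int) → Int
  | [], _, ans, _ => ans
  | player :: ps, i, ans, events =>
    let cap := m + capSum events i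
    if cap ≤ player then
      let need := PySem.Int.floordiv (player - cap) m + 1
      solutionGoB m k ps (i + 1) (ans + need) (events ++ [(i + k, need * m)])
    else
      solutionGoB m k ps (i + 1) ans events

def solution_alt (players : List Int) (m : Int) (k : Int) : Int :=
  solutionGoB m k players 0 0 []

-- ===== PRECONDITION & SPEC =====
-- Pre_ excludes exactly the inputs on which A raises: more than 24 hours (IndexError on limit[24]),
-- and m = 0 with some player ≥ 0 (ZeroDivisionError); on every other input A returns normally.
def Pre_solution (players : List Int) (m : Int) (k : Int) : Prop :=
  players.length ≤ 24 ∧ (m ≠ 0 ∨ ∀ p ∈ players, p < 0)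
instance (players : List Int) (m : Int) (k : Int) : Decidable (Pre_solution players m k) := by
  unfold Pre_solution; infer_instance

def pvWitness_solution : List Int × Int × Int := ([3, 1, 4], 2, 2)

def Spec_solution (players : List Int) (m : Int) (k : Int) (out : Int) : Prop := out = solution_alt players m k
instance (players : List Int) (m : Int) (k : Int) (out : Int) : Decidable (Spec_solution players m k out) := by unfold Spec_solution; infer_instance

-- ===== CLAIM (what is proved, stated in full; the proofs are below) =====
def Claim_equal_solution : Prop := ∀ (players : List Int) (m : Int) (k : Int), Dom_solution players m k → Pre_solution players m k → Spec_solution players m k (solution players m k)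

-- ===== LEMMAS AND PROOFS =====

theorem bumpStep_length (v : Int) (lim : List Int) (j : Int) :
    (bumpStep v lim j).length = lim.length := by
  unfold bumpStep; split
  · simp [PySem.List.length_pySetD]
  · rfl

theorem foldl_bump_length (v : Int) (js : List Int) (lim : List Int) :
    (js.foldl (bumpStep v) lim).length = lim.length := by
  induction js generalizing lim with
  | nil => rfl
  | cons j js ih => simpa [List.foldl, bumpStep_length] using ih (bumpStep v lim j)

theorem pyGetD_bumpStep (v : Int) (lim : List Int) (j : Int) (hj : 0 ≤ j)
    (hlen : lim.length = 24) (h : Nat) (hh : h < 24) :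
    PySem.List.pyGetD (bumpStep v lim j) (h : Int) 0 =
      if (h : Int) = j then PySem.List.pyGetD lim (h : Int) 0 + v
      else PySem.List.pyGetD lim (h : Int) 0 := by
  unfold bumpStep
  split
  · rename_i hj24
    obtain ⟨jn, rfl⟩ : ∃ jn : Nat, j = (jn : Int) := ⟨j.toNat, by omega⟩
    rw [PySem.List.pySetD_natCast]
    simp only [PySem.List.pyGetD_natCast]
    by_cases heq : h = jn
    · subst heq
      have hset : h < lim.length := by omega
      simp [List.getD_eq_getElem?_getD, hset]
    · have hne : ¬ ((h : Int) = (jn : Int)) := by omega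
      simp [List.getD_eq_getElem?_getD, hne, Ne.symm heq]
  · rename_i hj24
    have : ¬ ((h : Int) = j) := by omega
    simp [this]

theorem inner_get (v : Int) : ∀ (n : Nat) (a b : Int), (b - a).toNat = n → 0 ≤ a →
    ∀ (lim : List Int), lim.length = 24 → ∀ (h : Nat), h < 24 →
    PySem.List.pyGetD ((PySem.List.pyRange a b 1).foldl (bumpStep v) lim) (h : Int) 0 =
      PySem.List.pyGetD lim (h : Int) 0 + (if a ≤ (h : Int) ∧ (h : Int) < b then v else 0) := by
  intro n
  induction n with
  | zero =>
    intro a b hn ha lim hlen h hh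
    rw [PySem.List.pyRange_one_eq_nil (by omega)]
    simp only [List.foldl_nil]
    split_ifs <;> omega
  | succ n ih =>
    intro a b hn ha lim hlen h hh
    rw [PySem.List.pyRange_one_cons (by omega)]
    simp only [List.foldl_cons]
    rw [ih (a + 1) b (by omega) (by omega) (bumpStep v lim a) (by rw [bumpStep_length]; exact hlen) h hh]
    rw [pyGetD_bumpStep v lim a ha hlen h hh]
    split_ifs <;> omega

theorem capSum_append_single (es : List (Int × Int)) (e amt i : Int) :
    capSum (es ++ [(e, amt)]) i = capSum es i + (if i < e then amt else 0) := by
  unfold capSum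
  rw [List.filter_append]
  by_cases h : i < e <;> simp [h]

theorem go_eq (m k : Int) : ∀ (ps : List Int) (i : Nat) (ans : Int) (limit : List Int)
    (events : List (Int × Int)), limit.length = 24 → i + ps.length ≤ 24 →
    (∀ h : Nat, i ≤ h → h < 24 →
      PySem.List.pyGetD limit (h : Int) 0 = m + capSum events (h : Int)) →
    solutionGoA m k ps (i : Int) ans limit = solutionGoB m k ps (i : Int) ans events := by
  intro ps
  induction ps with
  | nil => intro i ans limit events _ _ _; rfl
  | cons p ps ih =>
    intro i ans limit events hlen hle hinv
    have hi24 : i < 24 := by simp at hle; omega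
    have hcap : PySem.List.pyGetD limit (i : Int) 0 = m + capSum events (i : Int) :=
      hinv i (le_refl i) hi24
    show (if PySem.List.pyGetD limit (i : Int) 0 ≤ p then _ else _) =
      (if m + capSum events (i : Int) ≤ p then _ else _)
    rw [hcap]
    have hcast : (i : Int) + 1 = ((i + 1 : Nat) : Int) := by push_cast; ring
    by_cases hc : m + capSum events (i : Int) ≤ p
    · simp only [if_pos hc]
      set w := PySem.Int.floordiv (p - (m + capSum events (i : Int))) m + 1 with hw
      rw [hcast]
      apply ih (i + 1)
      · rw [foldl_bump_length]; exact hlen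
      · simp at hle ⊢; omega
      · intro h hih hh24
        rw [inner_get (w * m) ((i : Int) + k - (i : Int)).toNat (i : Int) ((i : Int) + k) rfl
          (by omega) limit hlen h hh24]
        rw [capSum_append_single, hinv h (by omega) hh24]
        generalize (w * m) = wm
        split_ifs <;> omega
    · simp only [if_neg hc]
      rw [hcast]
      apply ih (i + 1) ans limit events hlen (by simp at hle ⊢; omega)
      intro h hih hh24; exact hinv h (by omega) hh24

-- ===== VERDICT (by name: the statement is the Claim_ definition above) =====
theorem solution_spec : Claim_equal_solution := by
  intro players m k _hdom hpre
  unfold Spec_solution solution solution_alt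
  have h0 : ((0 : Nat) : Int) = (0 : Int) := rfl
  rw [← h0]
  apply go_eq m k players 0 0 (List.replicate 24 m) []
  · simp
  · simpa using hpre.1
  · intro h _ hh24
    have : capSum [] (h : Int) = 0 := rfl
    rw [this, add_zero, PySem.List.pyGetD_natCast, List.getD_eq_getElem?_getD,
      List.getElem?_replicate, if_pos hh24]
    rfl
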